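-- pv_equiv track=rewrite | github.com/wazo-platform/wazo-acceptance | xivo_acceptance/lettuce/func.py | _all_ordered_superset_item
-- ===== SOURCE A (Python) =====
-- def _is_subset(subset, superset):
--     return subset <= superset
--
-- def _all_ordered_superset_item(subsets, supersets):
--     needle = 0
--     for superset in supersets:
--         if needle == len(subsets):
--             return True
--         if _is_subset(subsets[needle], superset):
--             needle += 1
--     return needle == len(subsets)
-- ===== SOURCE B (Python) =====
-- def _is_subset(subset, superset):
--     return subset <= superset
--
-- def _all_ordered_superset_item(subsets, supersets):
--     # Dynamic programming over suffixes: after processing supersets from the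
--     # right, dp[i] says whether subsets[i:] can be embedded (in order) into
--     # the processed suffix of supersets.  Answer is dp[0].
--     n = len(subsets)
--     dp = [i == n for i in range(n + 1)]
--     for sup in reversed(supersets):
--         dp = [dp[i] or (i < n and _is_subset(subsets[i], sup) and dp[i + 1])
--               for i in range(n + 1)]
--     return dp[0]
-- ===== Notes on version B (the rewrite author's own statement) =====
-- stated objective: alternative
-- what changed: Replaces A's forward greedy needle scan with a dynamic-programming table over suffixes: a boolean array dp (dp[i] = subsets[i:] embeds into the processed superset suffix) updated while walking supersets from the right, returning dp[0].
import Mathlib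
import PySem

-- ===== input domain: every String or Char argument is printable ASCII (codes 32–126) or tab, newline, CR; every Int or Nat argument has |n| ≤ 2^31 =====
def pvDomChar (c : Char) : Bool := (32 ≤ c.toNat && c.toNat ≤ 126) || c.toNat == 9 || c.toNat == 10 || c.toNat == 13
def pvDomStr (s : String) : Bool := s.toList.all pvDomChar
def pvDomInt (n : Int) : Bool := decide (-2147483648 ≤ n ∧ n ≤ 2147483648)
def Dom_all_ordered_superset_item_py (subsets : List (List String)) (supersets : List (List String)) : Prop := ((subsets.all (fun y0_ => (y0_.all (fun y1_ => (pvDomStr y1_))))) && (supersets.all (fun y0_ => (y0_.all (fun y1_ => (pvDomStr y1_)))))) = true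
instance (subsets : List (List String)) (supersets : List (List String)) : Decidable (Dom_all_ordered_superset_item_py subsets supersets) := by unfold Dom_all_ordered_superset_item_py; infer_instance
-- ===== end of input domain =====

-- B replaces A's forward greedy needle scan by a dynamic-programming table over
-- suffixes built while walking supersets from the right; objective: alternative.

-- ===== PORT A =====
-- Python's 'subset <= superset' on two sets (List String holds the distinct
-- elements, set semantics): every element of subset is a member of superset.
def is_subset_py (subset superset : List String) : Bool :=
  subset.all (fun x => superset.contains x)

-- the for-loop over supersets, carrying the needle counter
def aLoop (subsets : List (List String)) : List (List String) → Nat → Bool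
  | [], needle => needle == subsets.length
  | superset :: rest, needle =>
    if needle == subsets.length then true
    else if is_subset_py (subsets.getD needle []) superset then aLoop subsets rest (needle + 1)
    else aLoop subsets rest needle

def all_ordered_superset_item_py (subsets : List (List String)) (supersets : List (List String)) : Bool :=
  aLoop subsets supersets 0

-- ===== PORT B =====
-- one step of the DP: the list comprehension rebuilding dp for one superset
def bStep (subsets : List (List String)) (dp : List Bool) (sup : List String) : List Bool :=
  (List.range (subsets.length + 1)).map (fun i =>
    dp.getD i false ||
      (decide (i < subsets.length) && is_subset_py (subsets.getD i []) sup && dp.getD (i + 1) false))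

-- 'dp = [i == n for i in range(n+1)]' then 'for sup in reversed(supersets)'
def all_ordered_superset_item_py_alt (subsets : List (List String)) (supersets : List (List String)) : Bool :=
  (supersets.reverse.foldl (bStep subsets)
    ((List.range (subsets.length + 1)).map (fun i => i == subsets.length))).getD 0 false

-- ===== PRECONDITION & SPEC =====
def Spec_all_ordered_superset_item_py (subsets : List (List String)) (supersets : List (List String)) (out : Bool) : Prop := out = all_ordered_superset_item_py_alt subsets supersets
instance (subsets : List (List String)) (supersets : List (List String)) (out : Bool) : Decidable (Spec_all_ordered_superset_item_py subsets supersets out) := by unfold Spec_all_ordered_superset_item_py; infer_instance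

-- ===== CLAIM (what is proved, stated in full; the proofs are below) =====
def Claim_equal_all_ordered_superset_item_py : Prop := ∀ (subsets : List (List String)) (supersets : List (List String)), Dom_all_ordered_superset_item_py subsets supersets → Spec_all_ordered_superset_item_py subsets supersets (all_ordered_superset_item_py subsets supersets)

-- ===== LEMMAS AND PROOFS =====

-- the mathematical relation both programs decide: ordered embedding of subsets
-- (under ⊆) into supersets
def emb : List (List String) → List (List String) → Bool
  | [], _ => true
  | _ :: _, [] => false
  | a :: as, s :: ss => (is_subset_py a s && emb as ss) || emb (a :: as) ss

-- weakening: an embedding into ss is one into s :: ss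
theorem emb_weaken (xs : List (List String)) (s : List String) (ss : List (List String))
    (h : emb xs ss = true) : emb xs (s :: ss) = true := by
  cases xs with
  | nil => simp [emb]
  | cons a as => simp [emb, h]

-- dropping the first subset preserves embeddability
theorem emb_dropHead (a : List String) (as ss : List (List String))
    (h : emb (a :: as) ss = true) : emb as ss = true := by
  induction ss with
  | nil => simp [emb] at h
  | cons s rest ih =>
    simp only [emb, Bool.or_eq_true, Bool.and_eq_true] at h
    rcases h with ⟨_, h2⟩ | h
    · exact emb_weaken as s rest h2
    · exact emb_weaken as s rest (ih h)

-- absorption used by the greedy direction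
theorem emb_or_absorb (a : List String) (as ss : List (List String)) :
    (emb as ss || emb (a :: as) ss) = emb as ss := by
  by_cases h : emb (a :: as) ss = true
  · simp [h, emb_dropHead a as ss h]
  · have hf : emb (a :: as) ss = false := by simpa using h
    simp [hf]

-- A's greedy loop with needle n decides emb on the remaining subsets
theorem aLoop_eq_emb (supersets : List (List String)) :
    ∀ (subsets : List (List String)) (n : Nat), n ≤ subsets.length →
      aLoop subsets supersets n = emb (subsets.drop n) supersets := by
  induction supersets with
  | nil =>
    intro subsets n hn
    rcases Nat.lt_or_ge n subsets.length with h | h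
    · rw [List.drop_eq_getElem_cons h]
      show (n == subsets.length) = emb _ []
      simp [emb, beq_eq_false_iff_ne.mpr (show n ≠ subsets.length by omega)]
    · have hn' : n = subsets.length := le_antisymm hn h
      simp [aLoop, emb, hn', List.drop_length]
  | cons s rest ih =>
    intro subsets n hn
    by_cases he : n = subsets.length
    · simp [aLoop, emb, he, List.drop_length]
    · have hlt : n < subsets.length := lt_of_le_of_ne hn he
      have hx : subsets.drop n = subsets[n] :: subsets.drop (n + 1) :=
        List.drop_eq_getElem_cons hlt
      have hget : subsets.getD n [] = subsets[n] := by
        simp [List.getD, List.getElem?_eq_getElem hlt]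
      by_cases hs : is_subset_py subsets[n] s = true
      · have h1 : aLoop subsets (s :: rest) n = aLoop subsets rest (n + 1) := by
          simp only [aLoop, hget, hs, if_true]
          rw [if_neg (by simpa using he)]
        rw [h1, ih subsets (n + 1) hlt, hx]
        simp only [emb, hs, Bool.true_and]
        rw [← hx, ← ih subsets (n + 1) hlt, ih subsets (n + 1) hlt, hx]
        exact (emb_or_absorb subsets[n] (subsets.drop (n + 1)) rest).symm
      · have hsf : is_subset_py subsets[n] s = false := by simpa using hs
        have h1 : aLoop subsets (s :: rest) n = aLoop subsets rest n := by
          simp only [aLoop, hget, hsf]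
          rw [if_neg (by simpa using he)]
          simp
        rw [h1, ih subsets n hn, hx]
        simp [emb, hsf, ← hx]

-- reading an entry of the comprehension
theorem getD_map_range (m : Nat) (f : Nat → Bool) (i : Nat) (hi : i < m) :
    ((List.range m).map f).getD i false = f i := by
  simp [List.getD, hi]

-- invariant of B's fold (as a foldr over supersets): every dp entry i ≤ n
-- decides emb of the corresponding subsets suffix
theorem bFold_eq_emb (subsets : List (List String)) (supersets : List (List String)) :
    ∀ i, i ≤ subsets.length →
      (supersets.foldr (fun s dp => bStep subsets dp s)
        ((List.range (subsets.length + 1)).map (fun i => i == subsets.length))).getD i false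
      = emb (subsets.drop i) supersets := by
  induction supersets with
  | nil =>
    intro i hi
    rw [List.foldr_nil, getD_map_range _ _ i (by omega)]
    rcases Nat.lt_or_ge i subsets.length with h | h
    · rw [List.drop_eq_getElem_cons h]
      simp [emb, beq_eq_false_iff_ne.mpr (show i ≠ subsets.length by omega)]
    · have : i = subsets.length := le_antisymm hi h
      simp [emb, this, List.drop_length]
  | cons s rest ih =>
    intro i hi
    rw [List.foldr_cons]
    generalize hdp : List.foldr (fun s dp => bStep subsets dp s)
      ((List.range (subsets.length + 1)).map (fun i => i == subsets.length)) rest = dp at ih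
    unfold bStep
    rw [getD_map_range _ _ i (by omega), ih i hi]
    rcases Nat.lt_or_ge i subsets.length with h | h
    · have hget : subsets.getD i [] = subsets[i] := by
        simp [List.getD, List.getElem?_eq_getElem h]
      rw [ih (i + 1) h, hget, List.drop_eq_getElem_cons h]
      simp only [emb, h, decide_true, Bool.true_and]
      rw [Bool.or_comm]
    · have hie : i = subsets.length := le_antisymm hi h
      simp [hie, emb, List.drop_length]

-- ===== VERDICT (by name: the statement is the Claim_ definition above) =====
theorem all_ordered_superset_item_py_spec : Claim_equal_all_ordered_superset_item_py := by
  intro subsets supersets _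
  unfold Spec_all_ordered_superset_item_py all_ordered_superset_item_py all_ordered_superset_item_py_alt
  rw [List.foldl_reverse]
  rw [aLoop_eq_emb supersets subsets 0 (Nat.zero_le _)]
  rw [List.drop_zero]
  exact (bFold_eq_emb subsets supersets 0 (Nat.zero_le _)).symm
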